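-- pv_equiv track=rewrite | github.com/ing-bank/skorecard | skorecard/pipeline/bucketing_process.py | _find_remapped_specials
-- ===== SOURCE A (Python) =====
-- from typing import Dict, TypeVar, List
--
-- def _find_remapped_specials(bucket_labels: Dict, var_specials: Dict) -> Dict:
--     """
--     Remaps the specials after the prebucketing process.
--
--     Basically, every bucketer in the bucketing pipeline will now need to
--     use the prebucketing bucket as a different special value,
--     because prebucketing put the specials into a bucket.
--
--     Args:
--         bucket_labels (dict): The label for each unique bucket of a variable
--         var_specials (dict): The specials for a variable, if any.
--     """
--     if bucket_labels is None or var_specials is None: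
--         return {}
--
--     new_specials = {}
--     for label in var_specials.keys():
--         for bucket, bucket_label in bucket_labels.items():
--             if bucket_label == f"Special: {label}":
--                 new_specials[label] = [bucket]
--
--     return new_specials
-- ===== SOURCE B (Python) =====
-- def _find_remapped_specials(bucket_labels, var_specials):
--     if bucket_labels is None or var_specials is None:
--         return {}
--
--     # index each bucket label string to its bucket once; later buckets
--     # overwrite earlier ones, which is exactly the original's
--     # last-match-wins behaviour of the inner scan
--     index = {}
--     for bucket, bucket_label in bucket_labels.items():
--         index[bucket_label] = bucket
--
--     new_specials = {}
--     for label in var_specials.keys():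
--         key = f"Special: {label}"
--         if key in index:
--             new_specials[label] = [index[key]]
--     return new_specials
-- ===== Notes on version B (the rewrite author's own statement) =====
-- stated objective: faster
-- what changed: Replaced the nested scan of bucket_labels per special label by a dict index from bucket-label string to bucket built once, then a single lookup pass over the labels (last-match-wins preserved by dict overwrite).
import Mathlib
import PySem

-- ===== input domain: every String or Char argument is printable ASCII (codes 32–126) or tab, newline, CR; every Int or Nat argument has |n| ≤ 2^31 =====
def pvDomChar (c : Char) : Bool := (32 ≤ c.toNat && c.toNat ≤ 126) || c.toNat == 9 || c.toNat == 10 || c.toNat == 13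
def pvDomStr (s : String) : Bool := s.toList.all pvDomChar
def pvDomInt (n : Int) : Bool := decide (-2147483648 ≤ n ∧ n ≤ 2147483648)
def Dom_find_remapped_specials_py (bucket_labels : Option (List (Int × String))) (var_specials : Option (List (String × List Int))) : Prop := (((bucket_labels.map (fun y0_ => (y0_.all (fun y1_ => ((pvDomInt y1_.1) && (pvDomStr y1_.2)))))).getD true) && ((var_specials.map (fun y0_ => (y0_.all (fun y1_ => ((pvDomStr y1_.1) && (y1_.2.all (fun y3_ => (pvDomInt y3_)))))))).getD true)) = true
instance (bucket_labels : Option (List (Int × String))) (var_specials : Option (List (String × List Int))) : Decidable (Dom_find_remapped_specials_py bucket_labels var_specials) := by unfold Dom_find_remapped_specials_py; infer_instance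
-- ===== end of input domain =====

-- B replaces A's nested scan of bucket_labels per label by a dict index built once
-- plus a single lookup pass over the labels (objective: faster).

-- ===== PORT A =====
def find_remapped_specials_py (bucket_labels : Option (List (Int × String))) (var_specials : Option (List (String × List Int))) : List (String × List Int) :=
  match bucket_labels, var_specials with
  | some bls, some vss =>
    (vss.foldl (fun ns p =>
        bls.foldl (fun ns q =>
          if q.2 == "Special: " ++ p.1 then ns.insert p.1 [q.1] else ns) ns)
      (PySem.Dict.empty : PySem.Dict String (List Int))).items
  | _, _ => []

-- ===== PORT B =====
def find_remapped_specials_py_alt (bucket_labels : Option (List (Int × String))) (var_specials : Option (List (String × List Int))) : List (String × List Int) :=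
  match bucket_labels with
  | none => []
  | some bls =>
  match var_specials with
  | none => []
  | some vss =>
    let index : PySem.Dict String Int := bls.foldl (fun d q => d.insert q.2 q.1) PySem.Dict.empty
    (vss.foldl (fun ns p =>
        match index.get? ("Special: " ++ p.1) with
        | some b => ns.insert p.1 [b]
        | none => ns)
      (PySem.Dict.empty : PySem.Dict String (List Int))).items

-- ===== PRECONDITION & SPEC =====
def Spec_find_remapped_specials_py (bucket_labels : Option (List (Int × String))) (var_specials : Option (List (String × List Int))) (out : List (String × List Int)) : Prop := out = find_remapped_specials_py_alt bucket_labels var_specials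
instance (bucket_labels : Option (List (Int × String))) (var_specials : Option (List (String × List Int))) (out : List (String × List Int)) : Decidable (Spec_find_remapped_specials_py bucket_labels var_specials out) := by unfold Spec_find_remapped_specials_py; infer_instance

-- ===== CLAIM (what is proved, stated in full; the proofs are below) =====
def Claim_equal_find_remapped_specials_py : Prop := ∀ (bucket_labels : Option (List (Int × String))) (var_specials : Option (List (String × List Int))), Dom_find_remapped_specials_py bucket_labels var_specials → Spec_find_remapped_specials_py bucket_labels var_specials (find_remapped_specials_py bucket_labels var_specials)

-- ===== LEMMAS AND PROOFS =====

-- last-match accumulator: a foldl with any start equals the none-start fold with the start as fallback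
theorem pv_lastAcc (s : String) (xs : List (Int × String)) (acc : Option Int) :
    xs.foldl (fun a q => if q.2 == s then some q.1 else a) acc =
      match xs.foldl (fun a q => if q.2 == s then some q.1 else a) none with
      | some b => some b
      | none => acc := by
  induction xs generalizing acc with
  | nil => simp
  | cons q t ih =>
    simp only [List.foldl_cons]
    rw [ih (if q.2 == s then some q.1 else acc), ih (if q.2 == s then some q.1 else none)]
    cases t.foldl (fun a q => if q.2 == s then some q.1 else a) none <;>
      by_cases h : q.2 == s <;> simp [h]

-- A's inner scan over buckets = a single insert of the last matching bucket (or nothing)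
theorem pv_innerA (s k : String) (xs : List (Int × String)) (ns : PySem.Dict String (List Int)) :
    xs.foldl (fun ns q => if q.2 == s then ns.insert k [q.1] else ns) ns =
      match xs.foldl (fun a q => if q.2 == s then some q.1 else a) none with
      | some b => ns.insert k [b]
      | none => ns := by
  induction xs generalizing ns with
  | nil => simp
  | cons q t ih =>
    simp only [List.foldl_cons]
    rw [ih (if q.2 == s then ns.insert k [q.1] else ns), pv_lastAcc s t (if q.2 == s then some q.1 else none)]
    cases t.foldl (fun a q => if q.2 == s then some q.1 else a) none <;>
      by_cases h : q.2 == s <;> simp [h, PySem.Dict.insert_insert_self]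

-- B's index lookup = the last matching bucket of the scan
theorem pv_index (s : String) (xs : List (Int × String)) (d : PySem.Dict String Int) :
    (xs.foldl (fun d q => d.insert q.2 q.1) d).get? s =
      match xs.foldl (fun a q => if q.2 == s then some q.1 else a) none with
      | some b => some b
      | none => d.get? s := by
  induction xs generalizing d with
  | nil => simp
  | cons q t ih =>
    simp only [List.foldl_cons]
    rw [ih (d.insert q.2 q.1), pv_lastAcc s t (if q.2 == s then some q.1 else none)]
    cases t.foldl (fun a q => if q.2 == s then some q.1 else a) none with
    | some b => simp
    | none =>
      by_cases h : q.2 == s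
      · have hs : s = q.2 := (beq_iff_eq.mp h).symm
        simp [hs, PySem.Dict.get?_insert_self]
      · have hs : s ≠ q.2 := fun e => h (beq_iff_eq.mpr e.symm)
        simp [h, PySem.Dict.get?_insert, hs]

-- both outer folds over the labels agree pointwise
theorem pv_outer (bls : List (Int × String)) (vss : List (String × List Int)) (ns : PySem.Dict String (List Int)) :
    vss.foldl (fun ns p =>
        bls.foldl (fun ns q =>
          if q.2 == "Special: " ++ p.1 then ns.insert p.1 [q.1] else ns) ns) ns =
      vss.foldl (fun ns p =>
        match (bls.foldl (fun d q => d.insert q.2 q.1) (PySem.Dict.empty : PySem.Dict String Int)).get? ("Special: " ++ p.1) with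
        | some b => ns.insert p.1 [b]
        | none => ns) ns := by
  induction vss generalizing ns with
  | nil => rfl
  | cons p t ih =>
    simp only [List.foldl_cons]
    rw [pv_innerA ("Special: " ++ p.1) p.1 bls ns,
        pv_index ("Special: " ++ p.1) bls PySem.Dict.empty]
    cases bls.foldl (fun a q => if q.2 == ("Special: " ++ p.1) then some q.1 else a) none with
    | none => rw [PySem.Dict.get?_empty]; exact ih ns
    | some b => exact ih _

-- ===== VERDICT (by name: the statement is the Claim_ definition above) =====
theorem find_remapped_specials_py_spec : Claim_equal_find_remapped_specials_py := by
  intro bucket_labels var_specials _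
  unfold Spec_find_remapped_specials_py find_remapped_specials_py find_remapped_specials_py_alt
  match bucket_labels, var_specials with
  | none, _ => rfl
  | some bls, none => rfl
  | some bls, some vss =>
    show _ = _
    simp only
    rw [pv_outer bls vss PySem.Dict.empty]
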